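-- pv_equiv track=rewrite | github.com/shaqaiaq/prog-interface | Semaine 1/tk.py | formater_citation
-- ===== SOURCE A (Python) =====
-- def formater_citation(citations):
--     # Séparer la citation et l'auteur
--     if "-" in citations:
--         texte, auteur = citations.split("-", 1)
--     else:
--         texte, auteur = citations, ""
--
--     mots = texte.split()
--     cit_form = ""
--     for i in range(len(mots)):
--         cit_form += mots[i] + " "
--         if (i + 1) % 3 == 0:
--             cit_form += "\n"
--
--     # Ajouter l'auteur avec un saut de ligne
--     if auteur:
--         cit_form += "\n-" + auteur
--
--     return cit_form
-- ===== SOURCE B (Python) =====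
-- def formater_citation(citations):
--     # Separate citation text and author (same split as A)
--     if "-" in citations:
--         texte, auteur = citations.split("-", 1)
--     else:
--         texte, auteur = citations, ""
--
--     mots = texte.split()
--     nfull = len(mots) // 3
--     # Build the lines as a list: one joined line per full triple, then a partial tail
--     parts = [" ".join(mots[3 * j:3 * j + 3]) + " \n" for j in range(nfull)]
--     if len(mots) % 3:
--         parts.append(" ".join(mots[3 * nfull:]) + " ")
--     if auteur:
--         parts.append("\n-" + auteur)
--     return "".join(parts)
-- ===== Notes on version B (the rewrite author's own statement) =====
-- stated objective: alternative
-- what changed: Replaces A's single per-word loop with its (i+1)%3 modulo counter by a staged construction: a list comprehension building one space-joined line per full triple (len(mots)//3 of them), an optional partial tail line from len(mots)%3, the author entry appended to the list, and a single final join of the parts.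
import Mathlib
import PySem

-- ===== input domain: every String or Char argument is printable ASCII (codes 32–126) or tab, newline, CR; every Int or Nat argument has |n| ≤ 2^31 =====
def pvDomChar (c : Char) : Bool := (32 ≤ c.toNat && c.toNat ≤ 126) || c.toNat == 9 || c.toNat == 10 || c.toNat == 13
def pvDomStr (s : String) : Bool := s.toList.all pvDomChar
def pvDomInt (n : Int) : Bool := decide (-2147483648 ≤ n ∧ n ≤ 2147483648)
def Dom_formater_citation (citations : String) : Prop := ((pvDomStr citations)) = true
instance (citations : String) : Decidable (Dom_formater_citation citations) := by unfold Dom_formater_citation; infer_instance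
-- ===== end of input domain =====

-- B replaces A's per-word loop with its (i+1)%3 counter by a staged construction: a list
-- comprehension producing one joined line per full triple (len//3 of them), an optional
-- partial tail, the author entry, and one final join of the parts (objective: alternative).

-- ===== PORT A =====
-- texte, auteur = citations.split("-", 1) if "-" in citations else (citations, "")
def fcSplitA (cs : List Char) : List Char × List Char :=
  if PySem.Chars.isIn ['-'] cs then
    match PySem.Chars.splitOnMax cs ['-'] 1 with
    | t :: a :: _ => (t, a)
    | _ => (cs, ([] : List Char))   -- unreachable: split("-",1) yields two pieces here
  else (cs, ([] : List Char))

-- the body of A's for-i loop over range(len(mots)) with the modulo-3 counter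
def fcBodyA (mots : List (List Char)) (cit_form : List Char) (i : Int) : List Char :=
  let cit_form := cit_form ++ (PySem.List.pyGet? mots i).getD [] ++ [' ']
  if PySem.Int.mod (i + 1) 3 == 0 then cit_form ++ ['\n'] else cit_form

def fcLoopA (mots : List (List Char)) : List Char :=
  (PySem.List.pyRange 0 (mots.length : Int) 1).foldl (fcBodyA mots) []

def formater_citation (citations : String) : String :=
  let p := fcSplitA citations.toList
  let mots := PySem.Chars.split₀ p.1
  let cit_form := fcLoopA mots
  let cit_form := if p.2 = [] then cit_form else cit_form ++ ['\n', '-'] ++ p.2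
  String.ofList cit_form

-- ===== PORT B =====
-- the list comprehension: one space-joined line plus trailing space and newline per full triple
def fcLinesB (mots : List (List Char)) (nfull : Int) : List (List Char) :=
  (PySem.List.pyRange 0 nfull 1).map (fun j =>
    PySem.Chars.join [' '] (PySem.List.slice mots (some (3 * j)) (some (3 * j + 3))) ++ [' ', '\n'])

def formater_citation_alt (citations : String) : String :=
  let cs := citations.toList
  -- texte, auteur = citations.split("-", 1) if "-" in citations else (citations, "")
  let p :=
    if PySem.Chars.isIn ['-'] cs then
      match PySem.Chars.splitOnMax cs ['-'] 1 with
      | t :: a :: _ => (t, a)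
      | _ => (cs, ([] : List Char))   -- unreachable: split("-",1) yields two pieces here
    else (cs, ([] : List Char))
  let mots := PySem.Chars.split₀ p.1
  let nfull := PySem.Int.floordiv (mots.length : Int) 3
  let parts := fcLinesB mots nfull
  let parts :=
    if PySem.Int.mod (mots.length : Int) 3 ≠ 0 then
      parts ++ [PySem.Chars.join [' '] (PySem.List.slice mots (some (3 * nfull)) none) ++ [' ']]
    else parts
  let parts := if p.2 ≠ [] then parts ++ [['\n', '-'] ++ p.2] else parts
  String.ofList (PySem.Chars.join [] parts)

-- ===== PRECONDITION & SPEC =====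
def Spec_formater_citation (citations : String) (out : String) : Prop := out = formater_citation_alt citations
instance (citations : String) (out : String) : Decidable (Spec_formater_citation citations out) := by unfold Spec_formater_citation; infer_instance

-- ===== CLAIM (what is proved, stated in full; the proofs are below) =====
def Claim_equal_formater_citation : Prop := ∀ (citations : String), Dom_formater_citation citations → Spec_formater_citation citations (formater_citation citations)

-- ===== LEMMAS AND PROOFS =====

-- reference description of the formatted body: words three at a time
def chunkRec : List (List Char) → List Char
  | [] => []
  | [w] => w ++ [' ']
  | [w, x] => w ++ [' '] ++ x ++ [' ']
  | w :: x :: y :: rest => w ++ [' '] ++ x ++ [' '] ++ y ++ [' ', '\n'] ++ chunkRec rest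

-- Python's % on a positive divisor is Lean's emod
lemma pymod3_eq (a : Int) : PySem.Int.mod a 3 = a % 3 := by
  simp [PySem.Int.mod, Int.fmod_eq_emod]

-- ''.join peels one part at a time
lemma join_nil_cons (p : List Char) (rest : List (List Char)) :
    PySem.Chars.join [] (p :: rest) = p ++ PySem.Chars.join [] rest := by
  cases rest with
  | nil => simp [PySem.Chars.join_singleton, PySem.Chars.join_nil]
  | cons q r => simp [PySem.Chars.join_cons_cons]

-- ''.join of parts with a last entry appended
lemma join_nil_append_singleton (parts : List (List Char)) (t : List Char) :
    PySem.Chars.join [] (parts ++ [t]) = PySem.Chars.join [] parts ++ t := by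
  induction parts with
  | nil => simp [PySem.Chars.join_nil]
  | cons p r ih => simp [join_nil_cons, ih]

-- A SIDE: the index loop starting at 3*k computes chunkRec of mots.drop (3*k)
lemma fcLoopA_drop : ∀ (n : Nat) (mots : List (List Char)) (k : Nat) (acc : List Char),
    mots.length ≤ 3 * k + n →
    (PySem.List.pyRange ((3 * k : Nat) : Int) (mots.length : Int) 1).foldl (fcBodyA mots) acc
    = acc ++ chunkRec (mots.drop (3 * k)) := by
  intro n
  induction n using Nat.strong_induction_on with
  | _ n ih =>
    intro mots k acc h
    rcases hd : mots.drop (3 * k) with _ | ⟨w, rest⟩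
    · have hk : mots.length ≤ 3 * k := by
        by_contra hlt
        have := List.drop_eq_nil_iff.mp hd
        omega
      rw [PySem.List.pyRange_one_eq_nil (by exact_mod_cast hk)]
      simp [chunkRec]
    · have hk : 3 * k < mots.length := by
        have := congrArg List.length hd
        simp at this; omega
      have hw : mots[3 * k]? = some w := by
        have := List.getElem?_drop (xs := mots) (i := 3 * k) (j := 0)
        rw [hd] at this; simpa using this.symm
      have e0 : ∀ a, fcBodyA mots a ((3 * k : Nat) : Int) = a ++ w ++ [' '] := by
        intro a
        simp only [fcBodyA, PySem.List.pyGet?_natCast, hw, Option.getD_some, pymod3_eq,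
          beq_iff_eq]
        rw [if_neg (by omega : ¬ (((3 * k : Nat) : Int) + 1) % 3 = 0)]
      rcases rest with _ | ⟨x, rest2⟩
      · -- exactly one word left
        have hlen : mots.length = 3 * k + 1 := by
          have := congrArg List.length hd; simp at this; omega
        rw [PySem.List.pyRange_one_cons (by exact_mod_cast hk),
            show ((3 * k : Nat) : Int) + 1 = ((3 * k + 1 : Nat) : Int) by push_cast; ring,
            PySem.List.pyRange_one_eq_nil (by rw [hlen]), List.foldl_cons, List.foldl_nil, e0]
        simp [chunkRec]
      · have hx : mots[3 * k + 1]? = some x := by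
          have := List.getElem?_drop (xs := mots) (i := 3 * k) (j := 1)
          rw [hd] at this; simpa using this.symm
        have e1 : ∀ a, fcBodyA mots a ((3 * k + 1 : Nat) : Int) = a ++ x ++ [' '] := by
          intro a
          simp only [fcBodyA, PySem.List.pyGet?_natCast, hx, Option.getD_some, pymod3_eq,
            beq_iff_eq]
          rw [if_neg (by push_cast; omega : ¬ (((3 * k + 1 : Nat) : Int) + 1) % 3 = 0)]
        rcases rest2 with _ | ⟨y, rest3⟩
        · -- exactly two words left
          have hlen : mots.length = 3 * k + 2 := by
            have := congrArg List.length hd; simp at this; omega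
          rw [PySem.List.pyRange_one_cons (by exact_mod_cast hk),
              show ((3 * k : Nat) : Int) + 1 = ((3 * k + 1 : Nat) : Int) by push_cast; ring,
              PySem.List.pyRange_one_cons (by exact_mod_cast (by omega : 3 * k + 1 < mots.length)),
              show ((3 * k + 1 : Nat) : Int) + 1 = ((3 * k + 2 : Nat) : Int) by push_cast; ring,
              PySem.List.pyRange_one_eq_nil (by rw [hlen]),
              List.foldl_cons, List.foldl_cons, List.foldl_nil, e0, e1]
          simp [chunkRec]
        · -- a full group of three: peel three indices, then the IH at k + 1
          have hlen3 : 3 * k + 3 ≤ mots.length := by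
            have := congrArg List.length hd; simp at this; omega
          have hy : mots[3 * k + 2]? = some y := by
            have := List.getElem?_drop (xs := mots) (i := 3 * k) (j := 2)
            rw [hd] at this; simpa using this.symm
          have e2 : ∀ a, fcBodyA mots a ((3 * k + 2 : Nat) : Int) = a ++ y ++ [' '] ++ ['\n'] := by
            intro a
            simp only [fcBodyA, PySem.List.pyGet?_natCast, hy, Option.getD_some, pymod3_eq,
              beq_iff_eq]
            rw [if_pos (by push_cast; omega : (((3 * k + 2 : Nat) : Int) + 1) % 3 = 0)]
          have hrest : mots.drop (3 * (k + 1)) = rest3 := by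
            have h33 : List.drop 3 (mots.drop (3 * k)) = mots.drop (3 * (k + 1)) := by
              rw [List.drop_drop]; ring_nf
            rw [← h33, hd]; rfl
          rw [PySem.List.pyRange_one_cons (by exact_mod_cast hk),
              show ((3 * k : Nat) : Int) + 1 = ((3 * k + 1 : Nat) : Int) by push_cast; ring,
              PySem.List.pyRange_one_cons (by exact_mod_cast (by omega : 3 * k + 1 < mots.length)),
              show ((3 * k + 1 : Nat) : Int) + 1 = ((3 * k + 2 : Nat) : Int) by push_cast; ring,
              PySem.List.pyRange_one_cons (by exact_mod_cast (by omega : 3 * k + 2 < mots.length)),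
              show ((3 * k + 2 : Nat) : Int) + 1 = ((3 * (k + 1) : Nat) : Int) by push_cast; ring,
              List.foldl_cons, List.foldl_cons, List.foldl_cons, e0, e1, e2,
              ih (n - 3) (by omega) mots (k + 1) _ (by omega), hrest]
          simp [chunkRec]

lemma fcLoopA_eq (mots : List (List Char)) : fcLoopA mots = chunkRec mots := by
  have h := fcLoopA_drop mots.length mots 0 [] (by omega)
  simpa [fcLoopA] using h

-- B SIDE: the flattened parts list (lines ++ optional tail) is chunkRec
lemma fcPartsB_eq : ∀ (n : Nat) (mots : List (List Char)), mots.length ≤ n →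
    PySem.Chars.join []
      (if PySem.Int.mod (mots.length : Int) 3 ≠ 0 then
        fcLinesB mots (PySem.Int.floordiv (mots.length : Int) 3)
          ++ [PySem.Chars.join [' ']
                (PySem.List.slice mots (some (3 * PySem.Int.floordiv (mots.length : Int) 3)) none)
              ++ [' ']]
      else fcLinesB mots (PySem.Int.floordiv (mots.length : Int) 3))
    = chunkRec mots := by
  intro n
  induction n using Nat.strong_induction_on with
  | _ n ih =>
    intro mots h
    have hfd : PySem.Int.floordiv (mots.length : Int) 3
        = ((mots.length / 3 : Nat) : Int) := by
      exact_mod_cast PySem.Int.floordiv_natCast mots.length 3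
    have hmd : PySem.Int.mod (mots.length : Int) 3 = ((mots.length % 3 : Nat) : Int) := by
      exact_mod_cast PySem.Int.mod_natCast mots.length 3
    rcases mots with _ | ⟨w, rest⟩
    · simp [fcLinesB, chunkRec, PySem.Int.mod, PySem.Int.floordiv, PySem.List.pyRange_one_eq_nil,
        PySem.Chars.join, List.intercalate]
    · rcases rest with _ | ⟨x, rest2⟩
      · -- one word
        simp only [hfd, hmd]
        norm_num [fcLinesB, chunkRec, PySem.List.pyRange_one_eq_nil, PySem.Chars.join,
          PySem.List.slice_from_natCast, List.intercalate]
      · rcases rest2 with _ | ⟨y, rest3⟩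
        · -- two words
          simp only [hfd, hmd]
          norm_num [fcLinesB, chunkRec, PySem.List.pyRange_one_eq_nil, PySem.Chars.join,
            PySem.List.slice_from_natCast, List.intercalate]
        · -- three or more words: the first line is [w,x,y]; shift the rest to 'rest3'
          have hlen : (w :: x :: y :: rest3).length = rest3.length + 3 := by simp
          have hq : (w :: x :: y :: rest3).length / 3 = rest3.length / 3 + 1 := by
            rw [hlen]; omega
          have hr : (w :: x :: y :: rest3).length % 3 = rest3.length % 3 := by
            rw [hlen]; omega
          -- the comprehension over (nfull+1) indices = first line :: shifted comprehension
          have hlines : fcLinesB (w :: x :: y :: rest3) (((rest3.length / 3 + 1 : Nat) : Int))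
              = (w ++ [' '] ++ x ++ [' '] ++ y ++ [' ', '\n'])
                :: fcLinesB rest3 (((rest3.length / 3 : Nat) : Int)) := by
            unfold fcLinesB
            rw [PySem.List.pyRange_one, PySem.List.pyRange_one]
            have h1 : (((rest3.length / 3 + 1 : Nat) : Int) - 0).toNat = rest3.length / 3 + 1 := by
              omega
            have h2 : (((rest3.length / 3 : Nat) : Int) - 0).toNat = rest3.length / 3 := by
              omega
            rw [h1, h2, List.range_succ_eq_map]
            simp only [List.map_cons, List.map_map]
            congr 1
            · -- the j = 0 line
              rw [show (3 : Int) * (0 + ((0 : Nat) : Int)) = ((0 : Nat) : Int) by norm_num]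
              rw [show ((0 : Nat) : Int) + 3 = ((0 : Nat) : Int) + ((3 : Nat) : Int) by norm_num,
                PySem.List.slice_natCast_add]
              simp [PySem.Chars.join, List.intercalate]
            · -- the shifted lines
              apply List.map_congr_left
              intro k _
              simp only [Function.comp, Nat.succ_eq_add_one, Nat.cast_add, Nat.cast_one]
              have hc1 : (3 : Int) * (0 + ((k : Int) + 1)) = ((3 * k + 3 : Nat) : Int) := by
                push_cast; ring
              have hc2 : (3 : Int) * (0 + ((k : Int) + 1)) + 3 = ((3 * k + 3 : Nat) : Int) + ((3 : Nat) : Int) := by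
                push_cast; ring
              have hc3 : (3 : Int) * (0 + (k : Int)) = ((3 * k : Nat) : Int) := by push_cast; ring
              have hc4 : (3 : Int) * (0 + (k : Int)) + 3 = ((3 * k : Nat) : Int) + ((3 : Nat) : Int) := by
                push_cast; ring
              rw [hc2, hc1, hc4, hc3, PySem.List.slice_natCast_add, PySem.List.slice_natCast_add]
              have : List.drop (3 * k + 3) (w :: x :: y :: rest3) = List.drop (3 * k) rest3 := by
                rw [show 3 * k + 3 = 3 + 3 * k by ring, ← List.drop_drop]; rfl
              rw [this]
          -- the tail slice shifts the same way
          have htail : PySem.List.slice (w :: x :: y :: rest3)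
                (some (3 * (((rest3.length / 3 + 1 : Nat) : Int)))) none
              = PySem.List.slice rest3 (some (3 * (((rest3.length / 3 : Nat) : Int)))) none := by
            rw [show (3 : Int) * ((rest3.length / 3 + 1 : Nat) : Int)
                  = ((3 * (rest3.length / 3) + 3 : Nat) : Int) by push_cast; ring,
                show (3 : Int) * ((rest3.length / 3 : Nat) : Int)
                  = ((3 * (rest3.length / 3) : Nat) : Int) by push_cast; ring,
                PySem.List.slice_from_natCast, PySem.List.slice_from_natCast,
                show 3 * (rest3.length / 3) + 3 = 3 + 3 * (rest3.length / 3) by ring,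
                ← List.drop_drop]
            rfl
          have hfd' : PySem.Int.floordiv (rest3.length : Int) 3
              = ((rest3.length / 3 : Nat) : Int) := by
            exact_mod_cast PySem.Int.floordiv_natCast rest3.length 3
          have hmd' : PySem.Int.mod (rest3.length : Int) 3 = ((rest3.length % 3 : Nat) : Int) := by
            exact_mod_cast PySem.Int.mod_natCast rest3.length 3
          have hih := ih rest3.length (by simp at h; omega) rest3 le_rfl
          rw [hfd', hmd'] at hih
          simp only [hfd, hmd, hq, hr]
          rw [hlines]
          by_cases hm : ((rest3.length % 3 : Nat) : Int) ≠ 0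
          · rw [if_pos hm] at hih ⊢
            rw [htail, List.cons_append, join_nil_cons, hih]
            simp [chunkRec]
          · rw [if_neg hm] at hih ⊢
            rw [join_nil_cons, hih]
            simp [chunkRec]

-- ===== VERDICT (by name: the statement is the Claim_ definition above) =====
theorem formater_citation_spec : Claim_equal_formater_citation := by
  intro citations _
  simp only [Spec_formater_citation, formater_citation, formater_citation_alt, fcLoopA_eq,
    fcSplitA]
  set p := if PySem.Chars.isIn ['-'] citations.toList then
      match PySem.Chars.splitOnMax citations.toList ['-'] 1 with
      | t :: a :: _ => (t, a)
      | _ => (citations.toList, ([] : List Char))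
    else (citations.toList, ([] : List Char)) with hp
  by_cases ha : p.2 = []
  · rw [if_pos ha, if_neg (by simp [ha]), fcPartsB_eq (PySem.Chars.split₀ p.1).length _ le_rfl]
  · rw [if_neg ha, if_pos ha, join_nil_append_singleton,
      fcPartsB_eq (PySem.Chars.split₀ p.1).length _ le_rfl]
    simp
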